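-- pv_equiv track=rewrite | github.com/Perry-BIS/MeetHalfWay | app_streamlit_new.py | _combine_venue_preferences
-- ===== SOURCE A (Python) =====
-- from typing import Any, Dict, Optional, Tuple
--
-- UI_TO_ENGINE_VENUE = {
--     "Restaurant": "restaurant",
--     "Cafe": "cafe",
--     "Bar": "bar",
--     "Park": "park",
--     "Museum": "museum",
--     "Theater": "cinema",
-- }
--
-- def _combine_venue_preferences(prefs_a: Dict[str, Any], prefs_b: Dict[str, Any]) -> list[str]:
--     set_a = {UI_TO_ENGINE_VENUE.get(v, "restaurant") for v in prefs_a.get("venue_type", [])}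
--     set_b = {UI_TO_ENGINE_VENUE.get(v, "restaurant") for v in prefs_b.get("venue_type", [])}
--     overlap = [v for v in set_a.intersection(set_b) if v]
--     if overlap:
--         return sorted(overlap)
--     combined = [v for v in set_a.union(set_b) if v]
--     return sorted(combined) or ["restaurant"]
-- ===== SOURCE B (Python) =====
-- UI_TO_ENGINE_VENUE = {
--     "Restaurant": "restaurant",
--     "Cafe": "cafe",
--     "Bar": "bar",
--     "Park": "park",
--     "Museum": "museum",
--     "Theater": "cinema",
-- }
--
-- def _combine_venue_preferences(prefs_a, prefs_b):
--     # Sort each user's deduplicated mapped venues once, then a single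
--     # two-pointer merge scan yields both the common venues (overlap) and the
--     # merged union, already in sorted order -- no set intersection/union and
--     # no final sort passes.
--     xs = sorted({UI_TO_ENGINE_VENUE.get(v, "restaurant") for v in prefs_a.get("venue_type", [])})
--     ys = sorted({UI_TO_ENGINE_VENUE.get(v, "restaurant") for v in prefs_b.get("venue_type", [])})
--     overlap, union = [], []
--     i = j = 0
--     while i < len(xs) and j < len(ys):
--         if xs[i] == ys[j]:
--             overlap.append(xs[i]); union.append(xs[i]); i += 1; j += 1
--         elif xs[i] < ys[j]:
--             union.append(xs[i]); i += 1
--         else: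
--             union.append(ys[j]); j += 1
--     union += xs[i:] + ys[j:]
--     return overlap or union or ["restaurant"]
-- ===== Notes on version B (the rewrite author's own statement) =====
-- stated objective: alternative
-- what changed: Instead of A's set intersection/union followed by separate sort calls, B sorts each user's deduplicated mapped venue list once and computes both the overlap and the merged union in a single two-pointer merge scan, which emits them already sorted.
import Mathlib
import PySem

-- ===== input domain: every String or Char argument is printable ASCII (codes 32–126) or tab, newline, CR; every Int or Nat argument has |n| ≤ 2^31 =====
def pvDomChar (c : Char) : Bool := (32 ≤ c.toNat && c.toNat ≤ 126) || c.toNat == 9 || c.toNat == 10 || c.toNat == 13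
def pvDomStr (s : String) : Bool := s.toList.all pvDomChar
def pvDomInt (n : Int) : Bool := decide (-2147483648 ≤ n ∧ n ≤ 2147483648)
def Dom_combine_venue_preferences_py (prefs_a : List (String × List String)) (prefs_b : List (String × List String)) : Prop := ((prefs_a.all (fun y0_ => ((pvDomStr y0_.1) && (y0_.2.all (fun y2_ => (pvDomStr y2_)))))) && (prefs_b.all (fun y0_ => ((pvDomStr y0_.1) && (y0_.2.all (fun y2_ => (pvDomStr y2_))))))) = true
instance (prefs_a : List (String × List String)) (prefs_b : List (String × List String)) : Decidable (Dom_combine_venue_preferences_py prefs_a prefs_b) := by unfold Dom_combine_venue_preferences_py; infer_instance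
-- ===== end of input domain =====

-- B sorts each user's deduplicated mapped venue list and computes overlap and merged
-- union in one two-pointer merge scan, instead of A's set intersection/union plus
-- final sorts; objective: alternative algorithm, same result.

-- the module-level UI_TO_ENGINE_VENUE dict, used by both Pythons
def pvUiToEngine : PySem.Dict String String :=
  ⟨[("Restaurant", "restaurant"), ("Cafe", "cafe"), ("Bar", "bar"),
    ("Park", "park"), ("Museum", "museum"), ("Theater", "cinema")]⟩

-- ===== PORT A =====
def combine_venue_preferences_py (prefs_a : List (String × List String)) (prefs_b : List (String × List String)) : List String :=
  let set_a : PySem.Set String := PySem.Set.ofList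
    ((PySem.Dict.getD ⟨prefs_a⟩ "venue_type" []).map (fun v => PySem.Dict.getD pvUiToEngine v "restaurant"))
  let set_b : PySem.Set String := PySem.Set.ofList
    ((PySem.Dict.getD ⟨prefs_b⟩ "venue_type" []).map (fun v => PySem.Dict.getD pvUiToEngine v "restaurant"))
  let overlap := (PySem.Set.inter set_a set_b).filter (fun v => decide (v ≠ ""))
  if overlap ≠ [] then
    PySem.List.sorted overlap (fun x => x)
  else
    let combined := (PySem.Set.union set_a set_b).filter (fun v => decide (v ≠ ""))
    let s := PySem.List.sorted combined (fun x => x)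
    if s ≠ [] then s else ["restaurant"]

-- ===== PORT B =====
-- the while-loop of Source B: state (i, j) walks both sorted lists; overlap and union are
-- emitted in order (the base cases are Source B's trailing 'union += xs[i:] + ys[j:]')
def pvMerge : List String → List String → List String × List String
  | [], ys => ([], ys)
  | x :: xs, [] => ([], x :: xs)
  | x :: xs, y :: ys =>
    if x = y then
      let p := pvMerge xs ys
      (x :: p.1, x :: p.2)
    else if x < y then
      let p := pvMerge xs (y :: ys)
      (p.1, x :: p.2)
    else
      let p := pvMerge (x :: xs) ys
      (p.1, y :: p.2)
  termination_by xs ys => xs.length + ys.length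

def combine_venue_preferences_py_alt (prefs_a : List (String × List String)) (prefs_b : List (String × List String)) : List String :=
  let xs := PySem.List.sorted (PySem.Set.ofList
    ((PySem.Dict.getD ⟨prefs_a⟩ "venue_type" []).map (fun v => PySem.Dict.getD pvUiToEngine v "restaurant"))) (fun x => x)
  let ys := PySem.List.sorted (PySem.Set.ofList
    ((PySem.Dict.getD ⟨prefs_b⟩ "venue_type" []).map (fun v => PySem.Dict.getD pvUiToEngine v "restaurant"))) (fun x => x)
  let p := pvMerge xs ys
  if p.1 ≠ [] then p.1
  else if p.2 ≠ [] then p.2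
  else ["restaurant"]

-- ===== PRECONDITION & SPEC =====
def Spec_combine_venue_preferences_py (prefs_a : List (String × List String)) (prefs_b : List (String × List String)) (out : List String) : Prop := out = combine_venue_preferences_py_alt prefs_a prefs_b
instance (prefs_a : List (String × List String)) (prefs_b : List (String × List String)) (out : List String) : Decidable (Spec_combine_venue_preferences_py prefs_a prefs_b out) := by unfold Spec_combine_venue_preferences_py; infer_instance

-- ===== CLAIM (what is proved, stated in full; the proofs are below) =====
def Claim_equal_combine_venue_preferences_py : Prop := ∀ (prefs_a : List (String × List String)) (prefs_b : List (String × List String)), Dom_combine_venue_preferences_py prefs_a prefs_b → Spec_combine_venue_preferences_py prefs_a prefs_b (combine_venue_preferences_py prefs_a prefs_b)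

-- ===== LEMMAS AND PROOFS =====

-- the engine venue a UI venue maps to is never the empty string
theorem pvMapVNe (v : String) : PySem.Dict.getD pvUiToEngine v "restaurant" ≠ "" := by
  simp only [PySem.Dict.getD, PySem.Dict.get?]
  rcases h : List.find? (fun p => p.1 == v) pvUiToEngine.items with _ | p
  · rw [h]; simp
  · rw [h]
    have hm := List.mem_of_find?_eq_some h
    simp only [pvUiToEngine, List.mem_cons, List.not_mem_nil, or_false] at hm
    rcases hm with rfl|rfl|rfl|rfl|rfl|rfl <;> simp


theorem pvMerge_fst (xs ys : List String)
    (hxs : xs.Pairwise (· < ·)) (hys : ys.Pairwise (· < ·)) :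
    (pvMerge xs ys).1 = xs.filter (fun x => ys.contains x) := by
  fun_induction pvMerge xs ys with
  | case1 ys => simp
  | case2 x xs => simp
  | case3 xs x ys p ih =>
    have ih' : (pvMerge xs ys).1 = xs.filter (fun z => ys.contains z) :=
      ih (List.pairwise_cons.mp hxs).2 (List.pairwise_cons.mp hys).2
    show x :: (pvMerge xs ys).1 = _
    rw [ih', List.filter_cons_of_pos (by simp)]
    congr 1
    refine List.filter_congr ?_
    intro z hz
    have hzx : x < z := (List.pairwise_cons.mp hxs).1 z hz
    have hne' : z ≠ x := ne_of_gt hzx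
    simp [List.contains_eq_mem, List.mem_cons, hne']
  | case4 x xs y ys hne hlt p ih =>
    show (pvMerge xs (y :: ys)).1 = _
    rw [ih (List.pairwise_cons.mp hxs).2 hys, List.filter_cons_of_neg ?_]
    simp only [List.contains_eq_mem, decide_eq_true_eq, List.mem_cons, not_or]
    exact ⟨hne, fun hmem => absurd (hlt.trans ((List.pairwise_cons.mp hys).1 x hmem)) (lt_irrefl x)⟩
  | case5 x xs y ys hne hnlt p ih =>
    have hyx : y < x := lt_of_le_of_ne (not_lt.mp hnlt) (fun h => hne h.symm)
    show (pvMerge (x :: xs) ys).1 = _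
    rw [ih hxs (List.pairwise_cons.mp hys).2]
    refine List.filter_congr ?_
    intro z hz
    have hyz : y < z := by
      rcases List.mem_cons.mp hz with rfl | hz'
      · exact hyx
      · exact hyx.trans ((List.pairwise_cons.mp hxs).1 z hz')
    have hne' : z ≠ y := ne_of_gt hyz
    simp [List.contains_eq_mem, List.mem_cons, hne']

theorem pvMerge_snd_mem (xs ys : List String) (z : String) :
    z ∈ (pvMerge xs ys).2 ↔ z ∈ xs ∨ z ∈ ys := by
  fun_induction pvMerge xs ys with
  | case1 ys => simp
  | case2 x xs => simp
  | case3 xs x ys p ih =>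
    have ih' : z ∈ (pvMerge xs ys).2 ↔ z ∈ xs ∨ z ∈ ys := ih
    show z ∈ x :: (pvMerge xs ys).2 ↔ _
    simp only [List.mem_cons, ih']
    tauto
  | case4 x xs y ys hne hlt p ih =>
    show z ∈ x :: (pvMerge xs (y :: ys)).2 ↔ _
    simp only [List.mem_cons, ih]
    tauto
  | case5 x xs y ys hne hnlt p ih =>
    show z ∈ y :: (pvMerge (x :: xs) ys).2 ↔ _
    simp only [List.mem_cons, ih]
    tauto

theorem pvMerge_snd_pairwise (xs ys : List String)
    (hxs : xs.Pairwise (· < ·)) (hys : ys.Pairwise (· < ·)) :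
    (pvMerge xs ys).2.Pairwise (· < ·) := by
  fun_induction pvMerge xs ys with
  | case1 ys => simpa using hys
  | case2 x xs => simpa using hxs
  | case3 xs x ys p ih =>
    show List.Pairwise _ (x :: (pvMerge xs ys).2)
    refine List.pairwise_cons.mpr ⟨?_, ih (List.pairwise_cons.mp hxs).2 (List.pairwise_cons.mp hys).2⟩
    intro z hz
    rcases (pvMerge_snd_mem _ _ z).mp hz with h | h
    · exact (List.pairwise_cons.mp hxs).1 z h
    · exact (List.pairwise_cons.mp hys).1 z h
  | case4 x xs y ys hne hlt p ih =>
    show List.Pairwise _ (x :: (pvMerge xs (y :: ys)).2)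
    refine List.pairwise_cons.mpr ⟨?_, ih (List.pairwise_cons.mp hxs).2 hys⟩
    intro z hz
    rcases (pvMerge_snd_mem _ _ z).mp hz with h | h
    · exact (List.pairwise_cons.mp hxs).1 z h
    · rcases List.mem_cons.mp h with rfl | h'
      · exact hlt
      · exact hlt.trans ((List.pairwise_cons.mp hys).1 z h')
  | case5 x xs y ys hne hnlt p ih =>
    have hyx : y < x := lt_of_le_of_ne (not_lt.mp hnlt) (fun h => hne h.symm)
    show List.Pairwise _ (y :: (pvMerge (x :: xs) ys).2)
    refine List.pairwise_cons.mpr ⟨?_, ih hxs (List.pairwise_cons.mp hys).2⟩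
    intro z hz
    rcases (pvMerge_snd_mem _ _ z).mp hz with h | h
    · rcases List.mem_cons.mp h with rfl | h'
      · exact hyx
      · exact hyx.trans ((List.pairwise_cons.mp hxs).1 z h')
    · exact (List.pairwise_cons.mp hys).1 z h

-- ===== VERDICT (by name: the statement is the Claim_ definition above) =====
theorem combine_venue_preferences_py_spec : Claim_equal_combine_venue_preferences_py := by
  intro prefs_a prefs_b _
  unfold Spec_combine_venue_preferences_py
  simp only [combine_venue_preferences_py, combine_venue_preferences_py_alt]
  generalize hla : ((PySem.Dict.getD (⟨prefs_a⟩ : PySem.Dict String (List String)) "venue_type" []).map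
    (fun v => PySem.Dict.getD pvUiToEngine v "restaurant")) = la
  generalize hlb : ((PySem.Dict.getD (⟨prefs_b⟩ : PySem.Dict String (List String)) "venue_type" []).map
    (fun v => PySem.Dict.getD pvUiToEngine v "restaurant")) = lb
  have hlane : ∀ x ∈ la, x ≠ "" := by
    intro x hx
    rw [← hla] at hx
    rcases List.mem_map.mp hx with ⟨u, _, rfl⟩
    exact pvMapVNe u
  have hlbne : ∀ x ∈ lb, x ≠ "" := by
    intro x hx
    rw [← hlb] at hx
    rcases List.mem_map.mp hx with ⟨u, _, rfl⟩
    exact pvMapVNe u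
  set sa := PySem.Set.ofList la with hsa
  set sb := PySem.Set.ofList lb with hsb
  set xs := PySem.List.sorted sa (fun x => x) with hxsdef
  set ys := PySem.List.sorted sb (fun x => x) with hysdef
  have hxs : xs.Pairwise (· < ·) := PySem.List.sorted_ofList_pairwise_lt la
  have hys : ys.Pairwise (· < ·) := PySem.List.sorted_ofList_pairwise_lt lb
  have hxperm : xs.Perm sa := PySem.List.sorted_perm sa (fun x => x) false
  have hyperm : ys.Perm sb := PySem.List.sorted_perm sb (fun x => x) false
  -- A's interior filters drop nothing: no mapped venue is the empty string
  have hfInter : (PySem.Set.inter sa sb).filter (fun v => decide (v ≠ "")) = PySem.Set.inter sa sb := by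
    refine List.filter_eq_self.mpr ?_
    intro x hx
    have hxsa : x ∈ sa := by
      simp only [PySem.Set.inter, List.mem_filter] at hx
      exact hx.1
    exact decide_eq_true (hlane x ((PySem.Set.mem_ofList la x).mp hxsa))
  have hfUnion : (PySem.Set.union sa sb).filter (fun v => decide (v ≠ "")) = PySem.Set.union sa sb := by
    refine List.filter_eq_self.mpr ?_
    intro x hx
    rcases (PySem.Set.mem_union sa sb x).mp hx with hxa | hxb
    · exact decide_eq_true (hlane x ((PySem.Set.mem_ofList la x).mp hxa))
    · exact decide_eq_true (hlbne x ((PySem.Set.mem_ofList lb x).mp hxb))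
  -- A's sorted intersection is the merge's first component
  have hInter : PySem.List.sorted (PySem.Set.inter sa sb) (fun x => x) = (pvMerge xs ys).1 := by
    refine PySem.List.sorted_eq_of_perm_of_pairwise_lt _ _ _ ?_ ?_
    · rw [pvMerge_fst xs ys hxs hys]
      have h1 : xs.filter (fun x => ys.contains x) = xs.filter (fun x => sb.contains x) := by
        refine List.filter_congr ?_
        intro z _
        simp only [List.contains_eq_mem, hyperm.mem_iff, PySem.Set.contains_eq_listContains]
      rw [h1]
      exact hxperm.filter _
    · rw [pvMerge_fst xs ys hxs hys]
      exact hxs.sublist List.filter_sublist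
  -- A's sorted union is the merge's second component
  have hUnion : PySem.List.sorted (PySem.Set.union sa sb) (fun x => x) = (pvMerge xs ys).2 := by
    refine PySem.List.sorted_eq_of_perm_of_pairwise_lt _ _ _ ?_ (pvMerge_snd_pairwise xs ys hxs hys)
    refine (List.perm_ext_iff_of_nodup ?_ ?_).mpr ?_
    · exact ((pvMerge_snd_pairwise xs ys hxs hys).imp ne_of_lt)
    · exact PySem.Set.nodup_union sa sb (PySem.Set.nodup_ofList la)
    · intro z
      rw [pvMerge_snd_mem, PySem.Set.mem_union]
      rw [hxperm.mem_iff, hyperm.mem_iff]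
  rw [hfInter]
  by_cases hI : PySem.Set.inter sa sb = []
  · have hp1 : (pvMerge xs ys).1 = [] := by
      rw [← hInter, hI]
      rfl
    rw [hfUnion]
    simp only [hI, hp1, ne_eq, not_true_eq_false, if_false]
    simp only [hUnion]
  · have hp1 : (pvMerge xs ys).1 ≠ [] := by
      rw [← hInter]
      intro h0
      exact hI ((PySem.List.sorted_eq_nil_iff _ _ _).mp h0)
    simp [hI, hp1, hInter]
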